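-- pv_equiv track=rewrite | github.com/silverfield/pythonsessions | s07_graph_plotter/exercises/perm_patterns.py | is_pattern
-- ===== SOURCE A (Python) =====
-- def is_pattern(sub_perm, pattern):
--     if len(sub_perm) != len(pattern):
--         return False
--     sub_perm_sorted = [sub_perm[i] for i in range(len(sub_perm))]
--     sub_perm_sorted.sort()
--     ranks = {}
--     for i in range(len(sub_perm_sorted)):
--         ranks[sub_perm_sorted[i]] = i
--     sub_perm_pattern = [ranks[x] + 1 for x in sub_perm]
--
--     return all(sub_perm_pattern[i] == pattern[i] for i in range(len(pattern)))
-- ===== SOURCE B (Python) =====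
-- def is_pattern(sub_perm, pattern):
--     if len(sub_perm) != len(pattern):
--         return False
--     return all(sum(1 for y in sub_perm if y <= x) == p
--                for x, p in zip(sub_perm, pattern))
-- ===== Notes on version B (the rewrite author's own statement) =====
-- stated objective: simpler
-- what changed: Replaces the sort + rank-dict + rebuilt-pattern-list pipeline with a direct per-element count (rank+1 = number of elements <= x) compared pairwise against the pattern via zip, short-circuiting on the first mismatch.
import Mathlib
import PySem

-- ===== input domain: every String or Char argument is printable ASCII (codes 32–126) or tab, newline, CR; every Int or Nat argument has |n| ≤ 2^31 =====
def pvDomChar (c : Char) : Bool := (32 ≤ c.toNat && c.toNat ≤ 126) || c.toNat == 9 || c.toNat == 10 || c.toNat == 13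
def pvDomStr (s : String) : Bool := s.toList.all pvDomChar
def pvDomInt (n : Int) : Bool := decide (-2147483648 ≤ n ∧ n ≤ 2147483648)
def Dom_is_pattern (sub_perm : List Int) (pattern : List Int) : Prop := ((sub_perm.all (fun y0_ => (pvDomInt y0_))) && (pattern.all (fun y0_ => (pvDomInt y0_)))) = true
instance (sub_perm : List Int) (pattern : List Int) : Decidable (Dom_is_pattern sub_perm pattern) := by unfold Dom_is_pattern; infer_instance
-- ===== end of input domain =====

-- B replaces A's sort + rank-dict pipeline by a direct count of elements <= x; simpler, same result.

-- ===== PORT A =====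
-- literal transliteration of A: copy list by indices, sort, build rank dict by index loop,
-- map each element to rank+1, compare index by index.  ranks[x] can never raise KeyError
-- (every x of sub_perm is in the sorted copy), so the lookup is ported as (get? x).getD 0.
def is_pattern (sub_perm : List Int) (pattern : List Int) : Bool :=
  if (sub_perm.length : Int) ≠ (pattern.length : Int) then false
  else
    let sub_perm_sorted :=
      (PySem.List.pyRange 0 (sub_perm.length : Int) 1).map
        (fun i => PySem.List.pyGetD sub_perm i 0)
    let sub_perm_sorted := PySem.List.sorted sub_perm_sorted (fun x => x) false
    let ranks : PySem.Dict Int Int :=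
      (PySem.List.pyRange 0 (sub_perm_sorted.length : Int) 1).foldl
        (fun d i => d.insert (PySem.List.pyGetD sub_perm_sorted i 0) i) PySem.Dict.empty
    let sub_perm_pattern := sub_perm.map (fun x => (ranks.get? x).getD 0 + 1)
    (PySem.List.pyRange 0 (pattern.length : Int) 1).all
      (fun i => PySem.List.pyGetD sub_perm_pattern i 0 == PySem.List.pyGetD pattern i 0)

-- ===== PORT B =====
-- literal transliteration of Source B: all(sum(1 for y in sub_perm if y <= x) == p for x, p in zip(...))
def is_pattern_alt (sub_perm : List Int) (pattern : List Int) : Bool :=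
  if (sub_perm.length : Int) ≠ (pattern.length : Int) then false
  else
    (sub_perm.zip pattern).all
      (fun xp => sub_perm.foldl (fun acc y => if y ≤ xp.1 then acc + 1 else acc) (0 : Int) == xp.2)

-- ===== PRECONDITION & SPEC =====
def Spec_is_pattern (sub_perm : List Int) (pattern : List Int) (out : Bool) : Prop := out = is_pattern_alt sub_perm pattern
instance (sub_perm : List Int) (pattern : List Int) (out : Bool) : Decidable (Spec_is_pattern sub_perm pattern out) := by unfold Spec_is_pattern; infer_instance

-- ===== CLAIM (what is proved, stated in full; the proofs are below) =====
def Claim_equal_is_pattern : Prop := ∀ (sub_perm : List Int) (pattern : List Int), Dom_is_pattern sub_perm pattern → Spec_is_pattern sub_perm pattern (is_pattern sub_perm pattern)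

-- ===== LEMMAS AND PROOFS =====

-- the rank-building fold, rewritten over enumerate
def rankFold (l : List (Int × Int)) (d : PySem.Dict Int Int) : PySem.Dict Int Int :=
  l.foldl (fun d p => d.insert p.2 p.1) d

theorem rankFold_get?_of_not_mem (l : List (Int × Int)) (d : PySem.Dict Int Int) (x : Int)
    (hx : x ∉ l.map (·.2)) : (rankFold l d).get? x = d.get? x := by
  induction l generalizing d with
  | nil => rfl
  | cons a t ih =>
    simp only [List.map_cons, List.mem_cons, not_or] at hx
    simp only [rankFold, List.foldl_cons]
    rw [show (t.foldl (fun d p => d.insert p.2 p.1) (d.insert a.2 a.1)) = rankFold t (d.insert a.2 a.1) from rfl,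
        ih _ hx.2, PySem.Dict.get?_insert_of_ne _ _ hx.1]

-- on a sorted list, the last-write-wins rank of x ∈ l is (count of y ≤ x) - 1
theorem rankFold_get?_sorted (l : List Int) (s : Int) (d : PySem.Dict Int Int) (x : Int)
    (hx : x ∈ l) (hs : l.Pairwise (· ≤ ·)) :
    (rankFold (PySem.List.enumerate l s) d).get? x
      = some (s + (l.countP (fun y => decide (y ≤ x)) : Int) - 1) := by
  induction l generalizing s d with
  | nil => cases hx
  | cons a t ih =>
    rw [PySem.List.enumerate_cons]
    simp only [rankFold, List.foldl_cons]
    rw [List.pairwise_cons] at hs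
    by_cases hxt : x ∈ t
    · rw [show (PySem.List.enumerate t (s+1)).foldl (fun d p => d.insert p.2 p.1) (d.insert a s)
            = rankFold (PySem.List.enumerate t (s+1)) (d.insert a s) from rfl,
          ih (s+1) _ hxt hs.2]
      have hax : a ≤ x := hs.1 x hxt
      simp only [List.countP_cons, hax, decide_true, if_pos]
      congr 1
      push_cast
      ring
    · have hxa : x = a := by
        rw [List.mem_cons] at hx
        exact hx.resolve_right (fun h => absurd h hxt)
      subst hxa
      have hnot : x ∉ (PySem.List.enumerate t (s+1)).map (·.2) := by
        rw [PySem.List.map_snd_enumerate]; exact hxt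
      rw [show (PySem.List.enumerate t (s+1)).foldl (fun d p => d.insert p.2 p.1) (d.insert x s)
            = rankFold (PySem.List.enumerate t (s+1)) (d.insert x s) from rfl,
          rankFold_get?_of_not_mem _ _ _ hnot, PySem.Dict.get?_insert_self]
      have hct : t.countP (fun y => decide (y ≤ x)) = 0 := by
        rw [List.countP_eq_zero]
        intro y hy
        have h1 : x ≤ y := hs.1 y hy
        have h2 : ¬ (y ≤ x) := fun h => hxt (by rwa [le_antisymm h h1] at hy)
        simpa using h2
      simp [hct]

-- the Int foldl count in B is countP
theorem foldl_count_eq_countP (l : List Int) (x : Int) (init : Int) :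
    l.foldl (fun acc y => if y ≤ x then acc + 1 else acc) init
      = init + (l.countP (fun y => decide (y ≤ x)) : Int) := by
  induction l generalizing init with
  | nil => simp
  | cons a t ih =>
    simp only [List.foldl_cons, List.countP_cons]
    by_cases h : a ≤ x
    · rw [if_pos h, ih]; simp [h]; ring
    · rw [if_neg h, ih]; simp [h]

theorem is_pattern_spec : Claim_equal_is_pattern := by
  unfold Claim_equal_is_pattern
  intro sub_perm pattern _
  unfold Spec_is_pattern is_pattern is_pattern_alt
  dsimp only
  by_cases hlen : (sub_perm.length : Int) = (pattern.length : Int)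
  swap
  · rw [if_pos hlen, if_pos hlen]
  have hlenN : sub_perm.length = pattern.length := by exact_mod_cast hlen
  rw [if_neg (by simp [hlen]), if_neg (by simp [hlen])]
  -- the copied list is sub_perm itself
  rw [PySem.List.map_pyGetD_pyRange_zero']
  set srt := PySem.List.sorted sub_perm (fun x => x) false with hsrt
  -- characterize the rank lookup
  have hperm : srt.Perm sub_perm := PySem.List.sorted_perm _ _ _
  have hpw : srt.Pairwise (· ≤ ·) := PySem.List.sorted_pairwise _ _
  have hrank : ∀ x ∈ sub_perm,
      (((PySem.List.pyRange 0 (srt.length : Int) 1).foldl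
        (fun d i => d.insert (PySem.List.pyGetD srt i 0) i) PySem.Dict.empty).get? x).getD 0 + 1
      = (sub_perm.countP (fun y => decide (y ≤ x)) : Int) := by
    intro x hx
    have hxs : x ∈ srt := hperm.mem_iff.mpr hx
    have hfold : (PySem.List.pyRange 0 (srt.length : Int) 1).foldl
        (fun d i => d.insert (PySem.List.pyGetD srt i 0) i) PySem.Dict.empty
        = rankFold (PySem.List.enumerate srt 0) PySem.Dict.empty := by
      rw [rankFold, PySem.List.enumerate_eq_map_pyRange srt 0, List.foldl_map,
          PySem.List.len_eq]
    rw [hfold, rankFold_get?_sorted srt 0 _ x hxs hpw, hperm.countP_eq]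
    simp only [Option.getD_some]
    ring
  -- compare the two `all`s index by index
  rw [Bool.eq_iff_iff, List.all_eq_true, List.all_eq_true]
  constructor
  · intro h xp hxp
    obtain ⟨k, hk, hget⟩ := List.mem_iff_getElem.mp hxp
    have hk1 : k < sub_perm.length := by
      have := hk; rw [List.length_zip] at this; omega
    have hk2 : k < pattern.length := by
      have := hk; rw [List.length_zip] at this; omega
    have hzk : (sub_perm.zip pattern)[k] = (sub_perm[k], pattern[k]) := List.getElem_zip
    have hmem : ((k : Nat) : Int) ∈ PySem.List.pyRange 0 (pattern.length : Int) 1 := by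
      rw [PySem.List.mem_pyRange_one]; constructor <;> [positivity; exact_mod_cast hk2]
    have hh := h (k : Int) hmem
    rw [PySem.List.pyGetD_eq_getElem _ _ (by positivity)
          (by rw [List.length_map]; exact_mod_cast hk1),
        PySem.List.pyGetD_eq_getElem _ _ (by positivity) (by exact_mod_cast hk2)] at hh
    simp only [Int.toNat_natCast, List.getElem_map] at hh
    rw [← hget, hzk]
    simp only [beq_iff_eq] at hh ⊢
    rw [foldl_count_eq_countP, ← hrank sub_perm[k] (List.getElem_mem hk1), zero_add]
    exact hh
  · intro h i hi
    rw [PySem.List.mem_pyRange_one] at hi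
    have hiN : i.toNat < pattern.length := by omega
    have hiN' : i.toNat < sub_perm.length := by omega
    have hmem : (sub_perm[i.toNat], pattern[i.toNat]) ∈ sub_perm.zip pattern := by
      rw [List.mem_iff_getElem]
      exact ⟨i.toNat, by rw [List.length_zip]; omega, List.getElem_zip⟩
    have hh := h _ hmem
    rw [PySem.List.pyGetD_eq_getElem _ _ hi.1 (by rw [List.length_map]; omega),
        PySem.List.pyGetD_eq_getElem _ _ hi.1 hi.2]
    simp only [List.getElem_map]
    simp only [beq_iff_eq] at hh ⊢
    rw [foldl_count_eq_countP, zero_add] at hh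
    rw [hrank sub_perm[i.toNat] (List.getElem_mem hiN')]
    exact hh
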